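-- pv_equiv track=rewrite | github.com/jussiiih/Python-ohjelmointia-tehokkailla-tietorakenteilla-ja-algoritmeilla | longroute – kopio.py | count
-- ===== SOURCE A (Python) =====
-- def count(s, k):
--     x = 0
--     y = 0
--
--     joukko = set()
--     lista = []
--     joukko.add((0,0))
--     for i in range (0, k):
--         for merkki in s:
--             if merkki == "R":
--                 x += 1
--             elif merkki == "L":
--                 x -= 1
--             elif merkki == "U":
--                 y += 1
--             elif merkki == "D":
--                 y -= 1
--             koordinaatti = (x, y)
--             joukko.add(koordinaatti)
--         if koordinaatti == (0,0):
--             return len(joukko)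
--
--     return len(joukko)
-- ===== SOURCE B (Python) =====
-- def count(s, k):
--     if k <= 0:
--         return 1
--     # one pass over s: prefix positions and total displacement (x, y)
--     pts = []
--     x = 0
--     y = 0
--     for c in s:
--         if c == "R":
--             x += 1
--         elif c == "L":
--             x -= 1
--         elif c == "U":
--             y += 1
--         elif c == "D":
--             y -= 1
--         pts.append((x, y))
--     if (x, y) == (0, 0):
--         # every repeat retraces the same points
--         seen = {(0, 0)}
--         seen.update(pts)
--         return len(seen)
--     S = set(pts)
--     # repeat j visits S translated by j*(x, y); copies of a base point stop being
--     # new once the chain re-enters S: point P contributes min(k, g(P)) where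
--     # g(P) = min { t >= 1 : P + t*(x, y) in S } (k if no such t)
--     total = 0
--     for (px, py) in S:
--         g = None
--         for (qx, qy) in S:
--             t = (qx - px) // x if x != 0 else (qy - py) // y
--             if t >= 1 and qx == px + t * x and qy == py + t * y:
--                 if g is None or t < g:
--                     g = t
--         total += k if g is None else min(k, g)
--     # the start point (0,0) is extra unless some translated copy passes through it
--     hit = False
--     for (px, py) in S:
--         t = (0 - px) // x if x != 0 else (0 - py) // y
--         if 0 <= t < k and px + t * x == 0 and py + t * y == 0:
--             hit = True
--     return total if hit else total + 1
-- ===== Notes on version B (the rewrite author's own statement) =====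
-- stated objective: alternative
-- what changed: B walks s once to get the prefix trail and net displacement d, then instead of simulating all k repeats it counts, per distinct base point P, min(k, first recurrence time of P along d) and sums, handling k<=0 and d=(0,0) directly; the repeat count k disappears from the loops.
import Mathlib
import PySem

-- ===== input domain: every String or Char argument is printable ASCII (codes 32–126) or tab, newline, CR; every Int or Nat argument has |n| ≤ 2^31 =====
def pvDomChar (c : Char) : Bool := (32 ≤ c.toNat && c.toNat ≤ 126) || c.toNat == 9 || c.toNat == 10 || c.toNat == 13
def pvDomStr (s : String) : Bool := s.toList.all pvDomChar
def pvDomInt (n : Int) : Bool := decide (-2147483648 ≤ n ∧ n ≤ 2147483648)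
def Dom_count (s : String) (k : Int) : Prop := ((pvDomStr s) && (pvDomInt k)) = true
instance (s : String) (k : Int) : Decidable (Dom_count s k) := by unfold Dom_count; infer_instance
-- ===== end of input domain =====

-- B walks s once and counts, per base point, how many of its k translated copies
-- are new (first recurrence along the displacement), instead of A's simulation of
-- all k repeats.

-- ===== PORT A =====
-- one character step of the walk (the if/elif move dispatch of the Python source)
def pvDelta (c : Char) (p : Int × Int) : Int × Int :=
  if c = 'R' then (p.1 + 1, p.2)
  else if c = 'L' then (p.1 - 1, p.2)
  else if c = 'U' then (p.1, p.2 + 1)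
  else if c = 'D' then (p.1, p.2 - 1)
  else p

-- A's outer loop 'for i in range(0, k)': countdown recursion over the repeat count;
-- the inner 'for merkki in s' is the foldl, carrying (x, y) and the set joukko.
-- (On s = "" with k >= 1 Python's 'koordinaatti' is unbound — NameError; excluded by Pre_count.)
def pvOuterA (cs : List Char) : Nat → (Int × Int) → PySem.Set (Int × Int) → Int
  | 0, _, st => (st.length : Int)
  | n + 1, pos, st =>
    let r := cs.foldl (fun (acc : (Int × Int) × PySem.Set (Int × Int)) c =>
      let p := pvDelta c acc.1
      (p, PySem.Set.add acc.2 p)) (pos, st)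
    if r.1 = (0, 0) then (r.2.length : Int) else pvOuterA cs n r.1 r.2

def count (s : String) (k : Int) : Int :=
  pvOuterA s.toList k.toNat ((0 : Int), (0 : Int))
    (PySem.Set.add PySem.Set.empty ((0 : Int), (0 : Int)))

-- ===== PORT B =====
-- body of B's inner 'for (qx, qy) in S' loop: decode t, keep the smallest valid one
def pvStepB (x y : Int) (P : Int × Int) (g : Option Int) (Q : Int × Int) : Option Int :=
  let t := if x ≠ 0 then PySem.Int.floordiv (Q.1 - P.1) x
           else PySem.Int.floordiv (Q.2 - P.2) y
  if 1 ≤ t ∧ Q.1 = P.1 + t * x ∧ Q.2 = P.2 + t * y then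
    match g with
    | none => some t
    | some g0 => if t < g0 then some t else some g0
  else g

-- contribution of base point P: 'total += k if g is None else min(k, g)'
def pvContrib (x y k : Int) (S : List (Int × Int)) (P : Int × Int) : Int :=
  match S.foldl (pvStepB x y P) none with
  | none => k
  | some g0 => min k g0

-- body of B's origin-hit scan
def pvHitB (x y k : Int) (P : Int × Int) : Bool :=
  let t := if x ≠ 0 then PySem.Int.floordiv (0 - P.1) x
           else PySem.Int.floordiv (0 - P.2) y
  decide (0 ≤ t ∧ t < k ∧ P.1 + t * x = 0 ∧ P.2 + t * y = 0)

def count_alt (s : String) (k : Int) : Int :=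
  if k ≤ 0 then 1
  else
    -- one pass: prefix positions (pr.2) and total displacement (pr.1)
    let pr := s.toList.foldl (fun (acc : (Int × Int) × List (Int × Int)) c =>
      let p := pvDelta c acc.1
      (p, acc.2 ++ [p])) (((0 : Int), (0 : Int)), ([] : List (Int × Int)))
    let x := pr.1.1
    let y := pr.1.2
    if pr.1 = ((0 : Int), (0 : Int)) then
      ((PySem.Set.update (PySem.Set.ofList [((0 : Int), (0 : Int))]) pr.2).length : Int)
    else
      let S : PySem.Set (Int × Int) := PySem.Set.ofList pr.2
      let total := S.foldl (fun (tot : Int) P => tot + pvContrib x y k S P) 0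
      if S.any (pvHitB x y k) then total else total + 1

-- ===== PRECONDITION & SPEC =====
-- Pre_ excludes only s = "" with k >= 1, where Python A raises NameError (koordinaatti unbound).
def Pre_count (s : String) (k : Int) : Prop := k ≤ 0 ∨ s.toList ≠ []
instance (s : String) (k : Int) : Decidable (Pre_count s k) := by unfold Pre_count; infer_instance
def pvWitness_count : String × Int := ("RUL", 3)

def Spec_count (s : String) (k : Int) (out : Int) : Prop := out = count_alt s k
instance (s : String) (k : Int) (out : Int) : Decidable (Spec_count s k out) := by unfold Spec_count; infer_instance

-- ===== CLAIM (what is proved, stated in full; the proofs are below) =====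
def Claim_equal_count : Prop := ∀ (s : String) (k : Int), Dom_count s k → Pre_count s k → Spec_count s k (count s k)

-- ===== LEMMAS AND PROOFS =====

-- P translated t times along the per-repeat displacement d
def pvShift (d P : Int × Int) (t : Int) : Int × Int := (P.1 + t * d.1, P.2 + t * d.2)

-- positions visited while walking cs from p (one per character)
def pvTrail : (Int × Int) → List Char → List (Int × Int)
  | _, [] => []
  | p, c :: cs => let q := pvDelta c p; q :: pvTrail q cs

-- final position after walking cs from p
def pvEnd : (Int × Int) → List Char → (Int × Int)
  | p, [] => p
  | p, c :: cs => pvEnd (pvDelta c p) cs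

-- the t B decodes from the quotient of coordinate differences
def pvT (d P Q : Int × Int) : Int :=
  if d.1 ≠ 0 then PySem.Int.floordiv (Q.1 - P.1) d.1
  else PySem.Int.floordiv (Q.2 - P.2) d.2

-- the t >= 1 with Q = P + t*d, decoded the way B does (none if no such t)
def pvCand (d P Q : Int × Int) : Option Int :=
  if 1 ≤ pvT d P Q ∧ Q.1 = P.1 + pvT d P Q * d.1 ∧ Q.2 = P.2 + pvT d P Q * d.2
  then some (pvT d P Q) else none

-- first recurrence time of P along d within S
def pvGOpt (d : Int × Int) (S : List (Int × Int)) (P : Int × Int) : Option Int :=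
  (S.filterMap (pvCand d P)).min?

-- number of new points the k copies of P contribute
def pvM (d : Int × Int) (S : List (Int × Int)) (k : Int) (P : Int × Int) : Int :=
  match pvGOpt d S P with
  | none => k
  | some g => min k g

theorem pvInnerA_eq (cs : List Char) : ∀ (p : Int × Int) (st : PySem.Set (Int × Int)),
    cs.foldl (fun (acc : (Int × Int) × PySem.Set (Int × Int)) c =>
      let q := pvDelta c acc.1
      (q, PySem.Set.add acc.2 q)) (p, st)
    = (pvEnd p cs, (pvTrail p cs).foldl PySem.Set.add st) := by
  induction cs with
  | nil => intro p st; simp [pvEnd, pvTrail]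
  | cons c cs ih => intro p st; simp [pvEnd, pvTrail, List.foldl, ih]

theorem pvPrefix_eq (cs : List Char) : ∀ (p : Int × Int) (acc : List (Int × Int)),
    cs.foldl (fun (acc : (Int × Int) × List (Int × Int)) c =>
      let q := pvDelta c acc.1
      (q, acc.2 ++ [q])) (p, acc)
    = (pvEnd p cs, acc ++ pvTrail p cs) := by
  induction cs with
  | nil => intro p acc; simp [pvEnd, pvTrail]
  | cons c cs ih => intro p acc; simp [pvEnd, pvTrail, List.foldl, ih]

theorem pvDelta_shift (c : Char) (p a : Int × Int) :
    pvDelta c (p.1 + a.1, p.2 + a.2) = ((pvDelta c p).1 + a.1, (pvDelta c p).2 + a.2) := by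
  unfold pvDelta; split_ifs <;> simp [Prod.ext_iff] <;> ring

theorem pvTrail_shift (cs : List Char) : ∀ (p a : Int × Int),
    pvTrail (p.1 + a.1, p.2 + a.2) cs
      = (pvTrail p cs).map (fun q => (q.1 + a.1, q.2 + a.2)) := by
  induction cs with
  | nil => intro p a; simp [pvTrail]
  | cons c cs ih => intro p a; simp [pvTrail, pvDelta_shift, ih]

theorem pvEnd_shift (cs : List Char) : ∀ (p a : Int × Int),
    pvEnd (p.1 + a.1, p.2 + a.2) cs = ((pvEnd p cs).1 + a.1, (pvEnd p cs).2 + a.2) := by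
  induction cs with
  | nil => intro p a; simp [pvEnd]
  | cons c cs ih => intro p a; simp [pvEnd, pvDelta_shift, ih]

-- A's outer loop, when the per-repeat displacement D is nonzero, never hits the
-- early return and performs the translated-copy adds for repeats j, j+1, …
theorem pvOuter_loop (cs : List Char) (D : Int × Int) (hD : pvEnd ((0 : Int), (0 : Int)) cs = D)
    (hne : D ≠ ((0 : Int), (0 : Int))) :
    ∀ (n : Nat) (j : Int) (st : PySem.Set (Int × Int)), 0 ≤ j →
    pvOuterA cs n (j * D.1, j * D.2) st
      = (((PySem.List.pyRange j (j + n) 1).foldl (fun st j =>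
          (pvTrail ((0 : Int), (0 : Int)) cs).foldl (fun st2 p =>
            PySem.Set.add st2 (p.1 + j * D.1, p.2 + j * D.2)) st) st).length : Int) := by
  intro n
  induction n with
  | zero =>
    intro j st _
    simp [pvOuterA]
  | succ n ih =>
    intro j st hj
    have hend : pvEnd (j * D.1, j * D.2) cs = ((j + 1) * D.1, (j + 1) * D.2) := by
      have := pvEnd_shift cs ((0 : Int), (0 : Int)) (j * D.1, j * D.2)
      simp at this
      rw [this, hD]; exact Prod.ext_iff.mpr ⟨by ring, by ring⟩
    have htr : pvTrail (j * D.1, j * D.2) cs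
        = (pvTrail ((0 : Int), (0 : Int)) cs).map (fun q => (q.1 + j * D.1, q.2 + j * D.2)) := by
      have := pvTrail_shift cs ((0 : Int), (0 : Int)) (j * D.1, j * D.2)
      simpa using this
    have hnz : ((j + 1) * D.1, (j + 1) * D.2) ≠ ((0 : Int), (0 : Int)) := by
      intro h
      apply hne
      have h1 : (j + 1) * D.1 = 0 := congrArg Prod.fst h
      have h2 : (j + 1) * D.2 = 0 := congrArg Prod.snd h
      have hj1 : (j + 1) ≠ 0 := by omega
      have := mul_eq_zero.mp h1
      have := mul_eq_zero.mp h2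
      have hd1 : D.1 = 0 := by tauto
      have hd2 : D.2 = 0 := by tauto
      exact Prod.ext_iff.mpr ⟨hd1, hd2⟩
    have hrange : PySem.List.pyRange j (j + (n + 1 : Nat)) 1
        = j :: PySem.List.pyRange (j + 1) ((j + 1) + (n : Nat)) 1 := by
      have h : j < j + ((n : Int) + 1) := by omega
      rw [show (j + ((n : Nat) + 1 : Nat) : Int) = j + ((n : Int) + 1) by norm_num]
      rw [PySem.List.pyRange_one_cons h]
      congr 1
      ring_nf
    rw [show ((n : Nat) + 1 : Nat) = n + 1 from rfl]
    unfold pvOuterA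
    rw [pvInnerA_eq, hend, htr]
    simp only [hnz, if_false]
    rw [ih ((j + 1)) _ (by omega)]
    rw [hrange]
    simp [List.foldl_map]

-- ---- algebra of pvShift ----

theorem pvShift_shift (d P : Int × Int) (a b : Int) :
    pvShift d (pvShift d P a) b = pvShift d P (a + b) := by
  simp [pvShift, Prod.ext_iff]; constructor <;> ring

theorem pvShift_inj_t (d : Int × Int) (hd : d ≠ ((0 : Int), (0 : Int))) (P : Int × Int)
    {a b : Int} (h : pvShift d P a = pvShift d P b) : a = b := by
  have h1 : P.1 + a * d.1 = P.1 + b * d.1 := congrArg Prod.fst h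
  have h2 : P.2 + a * d.2 = P.2 + b * d.2 := congrArg Prod.snd h
  have hd' : d.1 ≠ 0 ∨ d.2 ≠ 0 := by
    by_contra hcon
    push_neg at hcon
    exact hd (Prod.ext_iff.mpr ⟨hcon.1, hcon.2⟩)
  rcases hd' with h' | h'
  · have : a * d.1 = b * d.1 := by omega
    exact mul_right_cancel₀ h' this
  · have : a * d.2 = b * d.2 := by omega
    exact mul_right_cancel₀ h' this

theorem pvShift_inj_P (d : Int × Int) (t : Int) {P Q : Int × Int}
    (h : pvShift d P t = pvShift d Q t) : P = Q := by
  have h1 : P.1 + t * d.1 = Q.1 + t * d.1 := congrArg Prod.fst h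
  have h2 : P.2 + t * d.2 = Q.2 + t * d.2 := congrArg Prod.snd h
  exact Prod.ext_iff.mpr ⟨by omega, by omega⟩

-- ---- pvCand decodes exactly the shift relation ----

theorem pvT_eq (d P : Int × Int) (hd : d ≠ ((0 : Int), (0 : Int))) (t : Int) :
    pvT d P (pvShift d P t) = t := by
  have hfd : ∀ a b : Int, b ≠ 0 → PySem.Int.floordiv (a * b) b = a := by
    intro a b hb
    show Int.fdiv (a * b) b = a
    exact Int.mul_fdiv_cancel a hb
  unfold pvT pvShift
  by_cases hx : d.1 ≠ 0
  · rw [if_pos hx]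
    have e : P.1 + t * d.1 - P.1 = t * d.1 := by ring
    simp only [e]
    exact hfd t d.1 hx
  · push_neg at hx
    have hy : d.2 ≠ 0 := fun hy => hd (Prod.ext_iff.mpr ⟨hx, hy⟩)
    rw [if_neg (by simpa using hx)]
    have e : P.2 + t * d.2 - P.2 = t * d.2 := by ring
    simp only [e]
    exact hfd t d.2 hy

theorem pvCand_iff (d P Q : Int × Int) (hd : d ≠ ((0 : Int), (0 : Int))) (t : Int) :
    pvCand d P Q = some t ↔ (1 ≤ t ∧ Q = pvShift d P t) := by
  unfold pvCand
  constructor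
  · intro h
    split_ifs at h with hc
    · injection h with h'
      subst h'
      exact ⟨hc.1, Prod.ext_iff.mpr ⟨hc.2.1, hc.2.2⟩⟩
  · rintro ⟨ht, rfl⟩
    rw [pvT_eq d P hd t]
    simp [pvShift, ht]

theorem pvMem_cands (d P : Int × Int) (hd : d ≠ ((0 : Int), (0 : Int)))
    (S : List (Int × Int)) (t : Int) :
    t ∈ S.filterMap (pvCand d P) ↔ (1 ≤ t ∧ pvShift d P t ∈ S) := by
  rw [List.mem_filterMap]
  constructor
  · rintro ⟨Q, hQ, hc⟩
    obtain ⟨ht, rfl⟩ := (pvCand_iff d P Q hd t).mp hc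
    exact ⟨ht, hQ⟩
  · rintro ⟨ht, hm⟩
    exact ⟨pvShift d P t, hm, (pvCand_iff d P _ hd t).mpr ⟨ht, rfl⟩⟩

-- ---- properties of the first recurrence time ----

theorem pvGOpt_some (d : Int × Int) (hd : d ≠ ((0 : Int), (0 : Int)))
    (S : List (Int × Int)) (P : Int × Int) {g : Int} (h : pvGOpt d S P = some g) :
    (1 ≤ g ∧ pvShift d P g ∈ S) ∧ ∀ t, 1 ≤ t → pvShift d P t ∈ S → g ≤ t := by
  unfold pvGOpt at h
  rw [List.min?_eq_some_iff] at h
  obtain ⟨hmem, hle⟩ := h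
  refine ⟨(pvMem_cands d P hd S g).mp hmem, ?_⟩
  intro t ht hm
  exact hle t ((pvMem_cands d P hd S t).mpr ⟨ht, hm⟩)

theorem pvGOpt_none (d : Int × Int) (hd : d ≠ ((0 : Int), (0 : Int)))
    (S : List (Int × Int)) (P : Int × Int) (h : pvGOpt d S P = none) :
    ∀ t, 1 ≤ t → pvShift d P t ∉ S := by
  unfold pvGOpt at h
  rw [List.min?_eq_none_iff] at h
  intro t ht hm
  have : t ∈ S.filterMap (pvCand d P) := (pvMem_cands d P hd S t).mpr ⟨ht, hm⟩
  rw [h] at this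
  exact absurd this (List.not_mem_nil)

theorem pvM_eq_none (d : Int × Int) (S : List (Int × Int)) (k : Int) (P : Int × Int)
    (h : pvGOpt d S P = none) : pvM d S k P = k := by
  simp [pvM, h]

theorem pvM_eq_some (d : Int × Int) (S : List (Int × Int)) (k : Int) (P : Int × Int)
    {g : Int} (h : pvGOpt d S P = some g) : pvM d S k P = min k g := by
  simp [pvM, h]

theorem pvM_pos (d : Int × Int) (S : List (Int × Int)) (k : Int) (hk : 1 ≤ k)
    (hd : d ≠ ((0 : Int), (0 : Int))) (P : Int × Int) : 1 ≤ pvM d S k P := by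
  cases h : pvGOpt d S P with
  | none => rw [pvM_eq_none d S k P h]; exact hk
  | some g =>
    rw [pvM_eq_some d S k P h]
    exact le_min hk (pvGOpt_some d hd S P h).1.1

theorem pvM_le (d : Int × Int) (S : List (Int × Int)) (k : Int) (P : Int × Int) :
    pvM d S k P ≤ k := by
  cases h : pvGOpt d S P with
  | none => rw [pvM_eq_none d S k P h]
  | some g => rw [pvM_eq_some d S k P h]; exact min_le_left _ _

-- every translated copy with 0 ≤ j < k lands in some truncated chain segment
theorem pvCover (d : Int × Int) (hd : d ≠ ((0 : Int), (0 : Int)))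
    (S : List (Int × Int)) (k : Int) :
    ∀ (n : Nat) (j : Int), j.toNat = n → 0 ≤ j → j < k → ∀ P ∈ S,
    ∃ Q ∈ S, ∃ i, 0 ≤ i ∧ i < pvM d S k Q ∧ pvShift d P j = pvShift d Q i := by
  intro n
  induction n using Nat.strong_induction_on with
  | _ n ih =>
    intro j hjn hj0 hjk P hP
    by_cases hlt : j < pvM d S k P
    · exact ⟨P, hP, j, hj0, hlt, rfl⟩
    · push_neg at hlt
      obtain ⟨g, hg⟩ : ∃ g, pvGOpt d S P = some g := by
        cases hgo : pvGOpt d S P with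
        | none => exfalso; rw [pvM_eq_none d S k P hgo] at hlt; omega
        | some g => exact ⟨g, rfl⟩
      have hgfacts := pvGOpt_some d hd S P hg
      have hg1 : 1 ≤ g := hgfacts.1.1
      have hgS : pvShift d P g ∈ S := hgfacts.1.2
      have hMg : pvM d S k P = min k g := pvM_eq_some d S k P hg
      have hgj : g ≤ j := by rw [hMg] at hlt; omega
      have hrec := ih (j - g).toNat (by omega) (j - g) rfl (by omega) (by omega)
        (pvShift d P g) hgS
      obtain ⟨Q, hQ, i, hi0, hiM, heq⟩ := hrec
      refine ⟨Q, hQ, i, hi0, hiM, ?_⟩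
      rw [← heq, pvShift_shift]
      congr 1
      ring_nf

-- two distinct truncated chain segments never meet
theorem pvNoCross (d : Int × Int) (hd : d ≠ ((0 : Int), (0 : Int)))
    (S : List (Int × Int)) (k : Int) (P Q : Int × Int) (hQ : Q ∈ S)
    (i j : Int) (hi0 : 0 ≤ i) (hij : i < j) (hjM : j < pvM d S k P)
    (heq : pvShift d P j = pvShift d Q i) : False := by
  have hQP : Q = pvShift d P (j - i) := by
    have h1 : P.1 + j * d.1 = Q.1 + i * d.1 := congrArg Prod.fst heq
    have h2 : P.2 + j * d.2 = Q.2 + i * d.2 := congrArg Prod.snd heq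
    refine Prod.ext_iff.mpr ⟨?_, ?_⟩ <;> simp [pvShift] <;> nlinarith [h1, h2]
  have hmem : pvShift d P (j - i) ∈ S := hQP ▸ hQ
  cases hgo : pvGOpt d S P with
  | none => exact pvGOpt_none d hd S P hgo (j - i) (by omega) hmem
  | some g =>
    have hfacts := pvGOpt_some d hd S P hgo
    have hgle : g ≤ j - i := hfacts.2 (j - i) (by omega) hmem
    have hMg : pvM d S k P = min k g := pvM_eq_some d S k P hgo
    omega

-- the union of the k translated copies of S, counted chain by chain
theorem pvCardUnion (d : Int × Int) (hd : d ≠ ((0 : Int), (0 : Int)))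
    (S : List (Int × Int)) (k : Int) :
    ((S.toFinset ×ˢ Finset.Ico (0 : Int) k).image
        (fun PJ : (Int × Int) × Int => pvShift d PJ.1 PJ.2)).card
    = ∑ P ∈ S.toFinset, (pvM d S k P).toNat := by
  have hU : (S.toFinset ×ˢ Finset.Ico (0 : Int) k).image
        (fun PJ : (Int × Int) × Int => pvShift d PJ.1 PJ.2)
      = S.toFinset.biUnion (fun P =>
          (Finset.Ico (0 : Int) (pvM d S k P)).image (pvShift d P)) := by
    ext x
    constructor
    · intro hx
      obtain ⟨PJ, hPJ, hximg⟩ := Finset.mem_image.mp hx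
      obtain ⟨hP, hj⟩ := Finset.mem_product.mp hPJ
      rw [Finset.mem_Ico] at hj
      obtain ⟨Q, hQ, i, hi0, hiM, heq⟩ :=
        pvCover d hd S k PJ.2.toNat PJ.2 rfl hj.1 hj.2 PJ.1 (List.mem_toFinset.mp hP)
      refine Finset.mem_biUnion.mpr ⟨Q, List.mem_toFinset.mpr hQ, ?_⟩
      refine Finset.mem_image.mpr ⟨i, Finset.mem_Ico.mpr ⟨hi0, hiM⟩, ?_⟩
      rw [← heq, hximg]
    · intro hx
      obtain ⟨P, hP, hxim⟩ := Finset.mem_biUnion.mp hx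
      obtain ⟨i, hi, heq⟩ := Finset.mem_image.mp hxim
      rw [Finset.mem_Ico] at hi
      exact Finset.mem_image.mpr ⟨(P, i), Finset.mem_product.mpr
        ⟨hP, Finset.mem_Ico.mpr ⟨hi.1, lt_of_lt_of_le hi.2 (pvM_le d S k P)⟩⟩, heq⟩
  rw [hU, Finset.card_biUnion]
  · apply Finset.sum_congr rfl
    intro P _
    rw [Finset.card_image_of_injective _ (fun a b h => pvShift_inj_t d hd P h)]
    simp [Int.card_Ico]
  · intro P hP Q hQ hne
    simp only [Function.onFun]
    rw [Finset.disjoint_left]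
    rintro x hx hy
    simp only [Finset.mem_image, Finset.mem_Ico] at hx hy
    obtain ⟨j, ⟨hj0, hjM⟩, rfl⟩ := hx
    obtain ⟨i, ⟨hi0, hiM⟩, heq⟩ := hy
    rcases lt_trichotomy i j with h | h | h
    · exact pvNoCross d hd S k P Q (by simpa using hQ) i j hi0 h hjM heq.symm
    · subst h
      exact hne (pvShift_inj_P d i heq.symm)
    · exact pvNoCross d hd S k Q P (by simpa using hP) j i hj0 h hiM heq

-- ---- membership and nodup of A's accumulated set ----

theorem pvMem_foldl_add {α : Type} [BEq α] [LawfulBEq α] (l : List α) :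
    ∀ (s : PySem.Set α) (x : α), x ∈ l.foldl PySem.Set.add s ↔ x ∈ s ∨ x ∈ l := by
  intro s x
  have := PySem.Set.mem_update (s := s) (xs := l) (y := x)
  simpa [PySem.Set.update] using this

theorem pvNodup_foldl_add {α : Type} [BEq α] [LawfulBEq α] (l : List α)
    (s : PySem.Set α) (hs : s.Nodup) : (l.foldl PySem.Set.add s).Nodup := by
  have := PySem.Set.nodup_update (s := s) (xs := l) hs
  simpa [PySem.Set.update] using this

theorem pvMem_bigfold (d : Int × Int) (pts : List (Int × Int)) :
    ∀ (js : List Int) (st : PySem.Set (Int × Int)) (x : Int × Int),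
    (x ∈ js.foldl (fun st j =>
        pts.foldl (fun st2 p =>
          PySem.Set.add st2 (p.1 + j * d.1, p.2 + j * d.2)) st) st)
    ↔ (x ∈ st ∨ ∃ j ∈ js, ∃ p ∈ pts, x = pvShift d p j) := by
  intro js
  induction js with
  | nil => intro st x; simp
  | cons j js ih =>
    intro st x
    rw [List.foldl_cons, ih]
    have hstep : ∀ y, (y ∈ pts.foldl (fun st2 p =>
        PySem.Set.add st2 (p.1 + j * d.1, p.2 + j * d.2)) st) ↔
        (y ∈ st ∨ ∃ p ∈ pts, y = pvShift d p j) := by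
      intro y
      rw [show (pts.foldl (fun st2 p =>
          PySem.Set.add st2 (p.1 + j * d.1, p.2 + j * d.2)) st)
        = (pts.map (fun p => pvShift d p j)).foldl PySem.Set.add st by
          rw [List.foldl_map]; rfl]
      rw [pvMem_foldl_add]
      simp [pvShift, eq_comm]
    rw [hstep]
    constructor
    · rintro (h | h)
      · rcases h with h | h
        · exact Or.inl h
        · exact Or.inr ⟨j, by simp, h⟩
      · obtain ⟨j', hj', hp⟩ := h
        exact Or.inr ⟨j', by simp [hj'], hp⟩
    · rintro (h | ⟨j', hj', hp⟩)
      · exact Or.inl (Or.inl h)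
      · rcases List.mem_cons.mp hj' with rfl | hj''
        · exact Or.inl (Or.inr hp)
        · exact Or.inr ⟨j', hj'', hp⟩

theorem pvNodup_bigfold (d : Int × Int) (pts : List (Int × Int)) :
    ∀ (js : List Int) (st : PySem.Set (Int × Int)), st.Nodup →
    (js.foldl (fun st j =>
        pts.foldl (fun st2 p =>
          PySem.Set.add st2 (p.1 + j * d.1, p.2 + j * d.2)) st) st).Nodup := by
  intro js
  induction js with
  | nil => intro st h; simpa
  | cons j js ih =>
    intro st h
    rw [List.foldl_cons]
    apply ih
    rw [show (pts.foldl (fun st2 p =>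
        PySem.Set.add st2 (p.1 + j * d.1, p.2 + j * d.2)) st)
      = (pts.map (fun p => pvShift d p j)).foldl PySem.Set.add st by
        rw [List.foldl_map]; rfl]
    exact pvNodup_foldl_add _ _ h

-- ---- B's inner fold computes pvGOpt ----

-- running minimum combination
def pvComb (a m : Option Int) : Option Int :=
  match a, m with
  | none, m => m
  | some a, none => some a
  | some a, some m => some (min a m)

theorem pvComb_assoc (a b c : Option Int) :
    pvComb (pvComb a b) c = pvComb a (pvComb b c) := by
  cases a <;> cases b <;> cases c <;> simp [pvComb, min_assoc]

theorem pvFoldl_min (l : List Int) : ∀ a : Int,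
    l.foldl min a = match l.min? with | none => a | some m => min a m := by
  induction l with
  | nil => intro a; simp
  | cons b l ih =>
    intro a
    rw [List.foldl_cons, ih (min a b)]
    have hb : (b :: l).min? = some (l.foldl min b) := rfl
    rw [hb, ih b]
    cases l.min? with
    | none => simp
    | some m => simp [min_assoc]

theorem pvMinq_cons (a : Int) (l : List Int) :
    (a :: l).min? = pvComb (some a) l.min? := by
  have hb : (a :: l).min? = some (l.foldl min a) := rfl
  rw [hb, pvFoldl_min]
  cases l.min? with
  | none => simp [pvComb]
  | some m => simp [pvComb]

theorem pvStepB_eq (d P : Int × Int) :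
    pvStepB d.1 d.2 P = fun g Q => pvComb g (pvCand d P Q) := by
  funext g Q
  show (if 1 ≤ pvT d P Q ∧ Q.1 = P.1 + pvT d P Q * d.1 ∧ Q.2 = P.2 + pvT d P Q * d.2 then
      match g with
      | none => some (pvT d P Q)
      | some g0 => if pvT d P Q < g0 then some (pvT d P Q) else some g0
    else g) = pvComb g (pvCand d P Q)
  unfold pvCand
  by_cases hc : 1 ≤ pvT d P Q ∧ Q.1 = P.1 + pvT d P Q * d.1 ∧ Q.2 = P.2 + pvT d P Q * d.2
  · rw [if_pos hc, if_pos hc]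
    cases g with
    | none => simp [pvComb]
    | some g0 =>
      simp only [pvComb]
      rcases lt_or_ge (pvT d P Q) g0 with h | h
      · rw [if_pos h, min_eq_right (le_of_lt h)]
      · rw [if_neg (not_lt.mpr h), min_eq_left h]
  · rw [if_neg hc, if_neg hc]
    cases g <;> simp [pvComb]

theorem pvFoldl_comb (f : (Int × Int) → Option Int) :
    ∀ (l : List (Int × Int)) (g : Option Int),
    l.foldl (fun g Q => pvComb g (f Q)) g = pvComb g (l.filterMap f).min? := by
  intro l
  induction l with
  | nil => intro g; cases g <;> simp [pvComb]
  | cons Q l ih =>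
    intro g
    rw [List.foldl_cons, ih]
    rw [List.filterMap_cons]
    cases hc : f Q with
    | none => cases g <;> simp [pvComb]
    | some t =>
      show pvComb (pvComb g (some t)) (List.filterMap f l).min?
          = pvComb g ((t :: List.filterMap f l).min?)
      rw [pvMinq_cons, ← pvComb_assoc]

theorem pvInnerB_eq (d : Int × Int) (P : Int × Int) (S : List (Int × Int)) :
    S.foldl (pvStepB d.1 d.2 P) none = pvGOpt d S P := by
  rw [pvStepB_eq d P, pvFoldl_comb (pvCand d P) S none]
  unfold pvGOpt
  cases (S.filterMap (pvCand d P)).min? <;> rfl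

theorem pvContrib_eq (d : Int × Int) (k : Int) (S : List (Int × Int)) (P : Int × Int) :
    pvContrib d.1 d.2 k S P = pvM d S k P := by
  unfold pvContrib pvM
  rw [pvInnerB_eq d P S]

theorem pvHitB_iff (d : Int × Int) (hd : d ≠ ((0 : Int), (0 : Int))) (k : Int) (P : Int × Int) :
    pvHitB d.1 d.2 k P = true ↔ ∃ t, 0 ≤ t ∧ t < k ∧ pvShift d P t = ((0 : Int), (0 : Int)) := by
  show decide (0 ≤ pvT d P ((0 : Int), (0 : Int)) ∧ pvT d P ((0 : Int), (0 : Int)) < k ∧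
      P.1 + pvT d P ((0 : Int), (0 : Int)) * d.1 = 0 ∧
      P.2 + pvT d P ((0 : Int), (0 : Int)) * d.2 = 0) = true ↔ _
  rw [decide_eq_true_iff]
  constructor
  · rintro ⟨h0, hk', h1, h2⟩
    exact ⟨pvT d P ((0 : Int), (0 : Int)), h0, hk', Prod.ext_iff.mpr ⟨by simpa [pvShift] using h1, by simpa [pvShift] using h2⟩⟩
  · rintro ⟨t, h0, hk', heq⟩
    have : pvT d P ((0 : Int), (0 : Int)) = t := by
      have := pvT_eq d P hd t
      rw [heq] at this
      exact this
    rw [this]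
    have h1 : P.1 + t * d.1 = 0 := by
      have := congrArg Prod.fst heq; simpa [pvShift] using this
    have h2 : P.2 + t * d.2 = 0 := by
      have := congrArg Prod.snd heq; simpa [pvShift] using this
    exact ⟨h0, hk', h1, h2⟩

theorem pvFoldl_sum (f : (Int × Int) → Int) :
    ∀ (l : List (Int × Int)) (a : Int),
    l.foldl (fun acc x => acc + f x) a = a + (l.map f).sum := by
  intro l
  induction l with
  | nil => intro a; simp
  | cons x l ih => intro a; rw [List.foldl_cons, ih]; simp; ring

-- ---- assembling both programs ----

theorem count_eq_alt (s : String) (k : Int) : count s k = count_alt s k := by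
  unfold count count_alt
  by_cases hk : k ≤ 0
  · have h0 : k.toNat = 0 := Int.toNat_of_nonpos hk
    rw [h0]
    simp [pvOuterA, hk, PySem.Set.add, PySem.Set.empty, PySem.Set.contains]
  · simp only [hk, if_false]
    rw [pvPrefix_eq]
    simp only [List.nil_append]
    by_cases hD : pvEnd ((0 : Int), (0 : Int)) s.toList = ((0 : Int), (0 : Int))
    · -- zero displacement: A returns after the first repeat
      obtain ⟨n, hn⟩ : ∃ n, k.toNat = n + 1 := ⟨k.toNat - 1, by omega⟩
      rw [hn]
      unfold pvOuterA
      rw [pvInnerA_eq, hD]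
      simp [PySem.Set.update, PySem.Set.ofList, PySem.Set.add, PySem.Set.empty,
        PySem.Set.contains]
    · simp only [if_neg hD]
      -- abbreviations
      set d := pvEnd ((0 : Int), (0 : Int)) s.toList with hd_def
      set pts := pvTrail ((0 : Int), (0 : Int)) s.toList with hpts_def
      set SL := PySem.Set.ofList pts with hSL_def
      -- A side: never early-returns, adds all k translated copies
      have hloop := pvOuter_loop s.toList d rfl hD k.toNat 0
        (PySem.Set.add PySem.Set.empty ((0 : Int), (0 : Int))) le_rfl
      simp only [zero_mul, zero_add] at hloop
      rw [hloop]
      have hkk : ((k.toNat : Int)) = k := by omega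
      rw [hkk]
      -- the accumulated list as a Finset
      set L := (PySem.List.pyRange 0 k 1).foldl (fun st j =>
          pts.foldl (fun st2 p =>
            PySem.Set.add st2 (p.1 + j * d.1, p.2 + j * d.2)) st)
          (PySem.Set.add PySem.Set.empty ((0 : Int), (0 : Int))) with hL_def
      have hst0 : PySem.Set.add PySem.Set.empty ((0 : Int), (0 : Int))
          = [((0 : Int), (0 : Int))] := by
        simp [PySem.Set.add, PySem.Set.empty, PySem.Set.contains]
      set U := ((SL.toFinset ×ˢ Finset.Ico (0 : Int) k).image
          (fun PJ : (Int × Int) × Int => pvShift d PJ.1 PJ.2)) with hU_def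
      have hmemL : ∀ x, x ∈ L ↔ (x = ((0 : Int), (0 : Int)) ∨ x ∈ U) := by
        intro x
        rw [hL_def, pvMem_bigfold d pts (PySem.List.pyRange 0 k 1) _ x]
        rw [hst0]
        simp only [List.mem_singleton]
        constructor
        · rintro (h | ⟨j, hj, p, hp, rfl⟩)
          · exact Or.inl h
          · refine Or.inr (Finset.mem_image.mpr ⟨(p, j), ?_, rfl⟩)
            rw [Finset.mem_product]
            refine ⟨?_, ?_⟩
            · rw [hSL_def]
              exact List.mem_toFinset.mpr ((PySem.Set.mem_ofList pts p).mpr hp)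
            · rw [Finset.mem_Ico]
              exact (PySem.List.mem_pyRange_one).mp hj
        · rintro (h | h)
          · exact Or.inl h
          · obtain ⟨⟨p, j⟩, hpj, rfl⟩ := Finset.mem_image.mp h
            rw [Finset.mem_product] at hpj
            refine Or.inr ⟨j, ?_, p, ?_, rfl⟩
            · rw [PySem.List.mem_pyRange_one]
              exact Finset.mem_Ico.mp hpj.2
            · have := List.mem_toFinset.mp (hSL_def ▸ hpj.1)
              exact (PySem.Set.mem_ofList pts p).mp this
      have hnodupL : L.Nodup := by
        rw [hL_def]
        apply pvNodup_bigfold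
        rw [hst0]
        simp
      have hLfin : L.toFinset = insert ((0 : Int), (0 : Int)) U := by
        ext x
        rw [List.mem_toFinset, hmemL x, Finset.mem_insert]
      have hlenL : (L.length : Int) = ((insert ((0 : Int), (0 : Int)) U).card : Int) := by
        rw [← hLfin, List.toFinset_card_of_nodup hnodupL]
      rw [hlenL]
      -- B side
      have hSLnodup : SL.Nodup := by rw [hSL_def]; exact PySem.Set.nodup_ofList pts
      have hCardU : U.card = ∑ P ∈ SL.toFinset, (pvM d SL k P).toNat := by
        rw [hU_def]
        exact pvCardUnion d hD SL k
      have htot : SL.foldl (fun (tot : Int) P => tot + pvContrib d.1 d.2 k SL P) 0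
          = ∑ P ∈ SL.toFinset, pvM d SL k P := by
        have h1 : SL.foldl (fun (tot : Int) P => tot + pvContrib d.1 d.2 k SL P) 0
            = (SL.map (pvContrib d.1 d.2 k SL)).sum := by
          rw [pvFoldl_sum (pvContrib d.1 d.2 k SL) SL 0]; ring
        rw [h1]
        have h2 : SL.map (pvContrib d.1 d.2 k SL) = SL.map (pvM d SL k) :=
          List.map_congr_left (fun P _ => pvContrib_eq d k SL P)
        rw [h2]
        exact (List.sum_toFinset _ hSLnodup).symm
      have hsumcast : ((∑ P ∈ SL.toFinset, (pvM d SL k P).toNat : Nat) : Int)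
          = ∑ P ∈ SL.toFinset, pvM d SL k P := by
        push_cast
        apply Finset.sum_congr rfl
        intro P _
        exact Int.toNat_of_nonneg (by have := pvM_pos d SL k (by omega) hD P; omega)
      have hany : (SL.any (pvHitB d.1 d.2 k) = true)
          ↔ ((0 : Int), (0 : Int)) ∈ U := by
        rw [List.any_eq_true]
        constructor
        · rintro ⟨P, hP, hPb⟩
          obtain ⟨t, h0, hk', heq⟩ := (pvHitB_iff d hD k P).mp hPb
          refine Finset.mem_image.mpr ⟨(P, t), ?_, heq⟩
          rw [Finset.mem_product]
          exact ⟨List.mem_toFinset.mpr hP, Finset.mem_Ico.mpr ⟨h0, hk'⟩⟩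
        · intro h
          obtain ⟨⟨P, t⟩, hPt, heq⟩ := Finset.mem_image.mp h
          rw [Finset.mem_product] at hPt
          refine ⟨P, List.mem_toFinset.mp hPt.1, (pvHitB_iff d hD k P).mpr
            ⟨t, (Finset.mem_Ico.mp hPt.2).1, (Finset.mem_Ico.mp hPt.2).2, heq⟩⟩
      rw [htot]
      by_cases hhit : SL.any (pvHitB d.1 d.2 k) = true
      · rw [if_pos hhit]
        have hmem : ((0 : Int), (0 : Int)) ∈ U := hany.mp hhit
        rw [Finset.insert_eq_self.mpr hmem, hCardU, hsumcast]
      · rw [if_neg hhit]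
        have hmem : ((0 : Int), (0 : Int)) ∉ U := fun h => hhit (hany.mpr h)
        rw [Finset.card_insert_of_notMem hmem, hCardU]
        push_cast [hsumcast]
        omega

-- ===== VERDICT (by name: the statement is the Claim_ definition above) =====
theorem count_spec : Claim_equal_count := by
  intro s k _ _
  unfold Spec_count
  exact count_eq_alt s k
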